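-- pv_equiv track=rewrite | github.com/supermarsx/office-janitor | src/office_janitor/licensing.py | _parse_ospp_dstatus
-- ===== SOURCE A (Python) =====
-- def _parse_ospp_dstatus(output: str) -> list[dict[str, str]]:
--     """!
--     @brief Parse OSPP.VBS /dstatus output into structured data.
--     @param output Raw stdout from /dstatus command.
--     @returns List of license dicts with parsed fields.
--     """
--     licenses: list[dict[str, str]] = []
--     current: dict[str, str] = {}
--
--     for line in output.splitlines():
--         line = line.strip()
--         if not line:
--             continue
--
--         # Each license block starts with LICENSE NAME:
--         if line.startswith("LICENSE NAME:"):
--             if current: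
--                 licenses.append(current)
--             current = {"name": line.split(":", 1)[1].strip()}
--         elif line.startswith("LICENSE DESCRIPTION:"):
--             current["description"] = line.split(":", 1)[1].strip()
--         elif line.startswith("LICENSE STATUS:"):
--             current["status"] = line.split(":", 1)[1].strip()
--         elif line.startswith("Last 5 characters of installed product key:"):
--             current["partial_key"] = line.split(":", 1)[1].strip()
--         elif line.startswith("SKU ID:"):
--             current["sku_id"] = line.split(":", 1)[1].strip()
--         elif line.startswith("ERROR CODE:"):
--             current["error_code"] = line.split(":", 1)[1].strip()
--
--     if current:
--         licenses.append(current)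
--
--     return licenses
-- ===== SOURCE B (Python) =====
-- _FIELD_TABLE = [
--     ("LICENSE NAME:", "name"),
--     ("LICENSE DESCRIPTION:", "description"),
--     ("LICENSE STATUS:", "status"),
--     ("Last 5 characters of installed product key:", "partial_key"),
--     ("SKU ID:", "sku_id"),
--     ("ERROR CODE:", "error_code"),
-- ]
--
--
-- def _parse_ospp_dstatus(output: str) -> list[dict[str, str]]:
--     """Two-pass parse: segment into blocks at 'LICENSE NAME:', then map
--     each block to a dict via a prefix->key table."""
--     lines = [stripped for raw in output.splitlines() if (stripped := raw.strip())]
--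
--     # Pass 1: segment into blocks; the first block holds any leading
--     # name-less fields, every later block starts with its LICENSE NAME line.
--     blocks: list[list[str]] = [[]]
--     for line in lines:
--         if line.startswith("LICENSE NAME:"):
--             blocks.append([line])
--         else:
--             blocks[-1].append(line)
--
--     # Pass 2: parse each block against the table; drop empty results.
--     result: list[dict[str, str]] = []
--     for block in blocks:
--         fields: dict[str, str] = {}
--         for line in block:
--             key = next((k for p, k in _FIELD_TABLE if line.startswith(p)), None)
--             if key is not None:
--                 fields[key] = line.split(":", 1)[1].strip()
--         if fields:
--             result.append(fields)
--     return result
-- ===== Notes on version B (the rewrite author's own statement) =====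
-- stated objective: alternative
-- what changed: A's single fused loop (mutating a current dict and flushing it on each LICENSE NAME line and at the end) is split into two differently-shaped passes: first segment the stripped non-empty lines into blocks at 'LICENSE NAME:' (keeping a leading name-less block), then map each block to a dict via a prefix-to-key table and drop empty dicts.
import Mathlib
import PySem

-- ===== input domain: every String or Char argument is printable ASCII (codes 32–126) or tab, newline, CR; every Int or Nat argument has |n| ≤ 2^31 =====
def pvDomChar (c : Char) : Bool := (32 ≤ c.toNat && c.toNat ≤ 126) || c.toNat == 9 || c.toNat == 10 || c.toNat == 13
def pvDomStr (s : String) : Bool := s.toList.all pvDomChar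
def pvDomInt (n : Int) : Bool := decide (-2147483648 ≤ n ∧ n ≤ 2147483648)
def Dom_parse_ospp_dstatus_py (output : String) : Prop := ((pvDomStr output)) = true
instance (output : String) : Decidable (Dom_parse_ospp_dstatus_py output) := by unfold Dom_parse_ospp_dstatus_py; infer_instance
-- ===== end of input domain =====

-- B re-decomposes A's fused single loop into two passes (segment the cleaned lines into
-- blocks at 'LICENSE NAME:', then map each block to a dict via a prefix→key table);
-- same return value on every input, objective: alternative.

-- ===== PORT A =====
-- line.split(":", 1)[1].strip(); in both programs it is only evaluated on lines that
-- start with a field prefix ending in ':', where index [1] exists (the getD defaults never fire)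
def pvAfterColon (line : String) : String :=
  PySem.Str.strip (((PySem.Str.splitMax? line ":" 1).getD []).getD 1 "")

-- the body of A's loop after the strip / empty-line 'continue' (line already stripped)
def pvStepACore (st : List (List (String × String)) × PySem.Dict String String) (line : String) :
    List (List (String × String)) × PySem.Dict String String :=
  if PySem.Str.startswith line "LICENSE NAME:" then
    ((if st.2.items ≠ [] then st.1 ++ [st.2.items] else st.1),
     PySem.Dict.mk [("name", pvAfterColon line)])
  else if PySem.Str.startswith line "LICENSE DESCRIPTION:" then
    (st.1, st.2.insert "description" (pvAfterColon line))
  else if PySem.Str.startswith line "LICENSE STATUS:" then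
    (st.1, st.2.insert "status" (pvAfterColon line))
  else if PySem.Str.startswith line "Last 5 characters of installed product key:" then
    (st.1, st.2.insert "partial_key" (pvAfterColon line))
  else if PySem.Str.startswith line "SKU ID:" then
    (st.1, st.2.insert "sku_id" (pvAfterColon line))
  else if PySem.Str.startswith line "ERROR CODE:" then
    (st.1, st.2.insert "error_code" (pvAfterColon line))
  else st

def pvStepA (st : List (List (String × String)) × PySem.Dict String String) (raw : String) :
    List (List (String × String)) × PySem.Dict String String :=
  let line := PySem.Str.strip raw
  if line = "" then st else pvStepACore st line

def parse_ospp_dstatus_py (output : String) : List (List (String × String)) :=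
  let st := (PySem.Str.splitlines output).foldl pvStepA ([], PySem.Dict.mk [])
  if st.2.items ≠ [] then st.1 ++ [st.2.items] else st.1

-- ===== PORT B =====
def pvTable : List (String × String) :=
  [("LICENSE NAME:", "name"), ("LICENSE DESCRIPTION:", "description"),
   ("LICENSE STATUS:", "status"),
   ("Last 5 characters of installed product key:", "partial_key"),
   ("SKU ID:", "sku_id"), ("ERROR CODE:", "error_code")]

-- one line of a block: first matching table prefix sets its key (Python's `next(...)`)
def pvApplyLine (d : PySem.Dict String String) (line : String) : PySem.Dict String String :=
  match pvTable.find? (fun e => PySem.Str.startswith line e.1) with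
  | some e => d.insert e.2 (pvAfterColon line)
  | none => d

def pvParseBlock (ls : List String) : List (String × String) :=
  (ls.foldl pvApplyLine (PySem.Dict.mk [])).items

-- pass 1: segment into blocks; `acc` is the currently open block (blocks[-1])
def pvBlocks : List String → List String → List (List String)
  | [], acc => [acc]
  | l :: rest, acc =>
      if PySem.Str.startswith l "LICENSE NAME:" then acc :: pvBlocks rest [l]
      else pvBlocks rest (acc ++ [l])

def parse_ospp_dstatus_py_alt (output : String) : List (List (String × String)) :=
  let cleaned := ((PySem.Str.splitlines output).map PySem.Str.strip).filter (· ≠ "")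
  ((pvBlocks cleaned []).map pvParseBlock).filter (· ≠ [])

-- ===== PRECONDITION & SPEC =====
def Spec_parse_ospp_dstatus_py (output : String) (out : List (List (String × String))) : Prop := out = parse_ospp_dstatus_py_alt output
instance (output : String) (out : List (List (String × String))) : Decidable (Spec_parse_ospp_dstatus_py output out) := by unfold Spec_parse_ospp_dstatus_py; infer_instance

-- ===== CLAIM (what is proved, stated in full; the proofs are below) =====
def Claim_equal_parse_ospp_dstatus_py : Prop := ∀ (output : String), Dom_parse_ospp_dstatus_py output → Spec_parse_ospp_dstatus_py output (parse_ospp_dstatus_py output)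

-- ===== LEMMAS AND PROOFS =====

-- A's finishing step (append the still-open block if non-empty)
def pvFinishA (st : List (List (String × String)) × PySem.Dict String String) :
    List (List (String × String)) :=
  if st.2.items ≠ [] then st.1 ++ [st.2.items] else st.1

-- A's raw-line fold = the core fold over the stripped, non-empty lines
theorem pvFoldA_clean (ls : List String) (st : List (List (String × String)) × PySem.Dict String String) :
    ls.foldl pvStepA st = ((ls.map PySem.Str.strip).filter (· ≠ "")).foldl pvStepACore st := by
  induction ls generalizing st with
  | nil => rfl
  | cons l rest ih =>
      by_cases h : PySem.Str.strip l = "" <;> simp [pvStepA, h, ih]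

-- the accumulated license list only ever grows at the front of the state
theorem pvStep_shift (st : List (List (String × String)) × PySem.Dict String String) (l : String) :
    pvStepACore st l = (st.1 ++ (pvStepACore ([], st.2) l).1, (pvStepACore ([], st.2) l).2) := by
  unfold pvStepACore
  split_ifs <;> simp

theorem pvFoldA_append (ls : List String) :
    ∀ st : List (List (String × String)) × PySem.Dict String String,
    ls.foldl pvStepACore st = (st.1 ++ (ls.foldl pvStepACore ([], st.2)).1, (ls.foldl pvStepACore ([], st.2)).2) := by
  induction ls with
  | nil => intro st; simp
  | cons l rest ih =>
      intro st
      simp only [List.foldl_cons]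
      rw [ih (pvStepACore st l), ih (pvStepACore ([], st.2) l)]
      rw [pvStep_shift st l]
      simp [List.append_assoc]

theorem pvFinishA_append (lics : List (List (String × String)))
    (st : List (List (String × String)) × PySem.Dict String String) :
    pvFinishA (lics ++ st.1, st.2) = lics ++ pvFinishA st := by
  unfold pvFinishA; split_ifs <;> simp

-- on a non-NAME line, A's elif chain is exactly B's table lookup applied to the current dict
theorem pvStepACore_eq_apply (cur : PySem.Dict String String) (l : String)
    (h : PySem.Str.startswith l "LICENSE NAME:" = false) :
    pvStepACore ([], cur) l = ([], pvApplyLine cur l) := by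
  unfold pvStepACore pvApplyLine pvTable
  simp only [List.find?, h]
  split_ifs <;> simp_all

-- on a NAME line, A emits the open block and restarts from {"name": …}
theorem pvStepACore_name (cur : PySem.Dict String String) (l : String)
    (h : PySem.Str.startswith l "LICENSE NAME:" = true) :
    pvStepACore ([], cur) l =
      ((if cur.items ≠ [] then [cur.items] else []), PySem.Dict.mk [("name", pvAfterColon l)]) := by
  unfold pvStepACore
  simp only [h, if_true]
  split_ifs <;> simp_all

-- on a NAME line, B's table lookup on the empty dict is exactly that fresh {"name": …}
theorem pvApply_name (l : String) (h : PySem.Str.startswith l "LICENSE NAME:" = true) :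
    pvApplyLine (PySem.Dict.mk []) l = PySem.Dict.mk [("name", pvAfterColon l)] := by
  unfold pvApplyLine pvTable
  simp only [List.find?, h]
  rfl

-- main correspondence: A's fused loop, started with the dict parsed from the open block
-- `acc`, equals B's segmentation seeded with `acc`, parsed blockwise and filtered
theorem pvMain (ls : List String) : ∀ acc : List String,
    pvFinishA (ls.foldl pvStepACore ([], acc.foldl pvApplyLine (PySem.Dict.mk []))) =
      ((pvBlocks ls acc).map pvParseBlock).filter (· ≠ []) := by
  induction ls with
  | nil =>
      intro acc
      simp only [List.foldl_nil, pvBlocks, List.map, List.filter, pvFinishA, pvParseBlock]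
      split_ifs <;> simp_all
  | cons l rest ih =>
      intro acc
      by_cases h : PySem.Str.startswith l "LICENSE NAME:" = true
      · simp only [List.foldl_cons, pvBlocks, h, if_true, List.map, List.filter]
        rw [pvStepACore_name _ _ h, pvFoldA_append, pvFinishA_append]
        rw [show PySem.Dict.mk [("name", pvAfterColon l)] = pvApplyLine (PySem.Dict.mk []) l from (pvApply_name l h).symm]
        have h2 := ih [l]
        simp only [List.foldl_cons, List.foldl_nil] at h2
        rw [h2]
        unfold pvParseBlock
        by_cases hacc : (acc.foldl pvApplyLine (PySem.Dict.mk [])).items = [] <;>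
          simp [hacc]
      · rw [Bool.not_eq_true] at h
        simp only [List.foldl_cons, pvBlocks, h, Bool.false_eq_true, if_false]
        rw [pvStepACore_eq_apply _ _ h]
        have h2 := ih (acc ++ [l])
        simpa using h2

-- ===== VERDICT (by name: the statement is the Claim_ definition above) =====
theorem parse_ospp_dstatus_py_spec : Claim_equal_parse_ospp_dstatus_py := by
  intro output _
  unfold Spec_parse_ospp_dstatus_py parse_ospp_dstatus_py parse_ospp_dstatus_py_alt
  rw [pvFoldA_clean]
  have h := pvMain (((PySem.Str.splitlines output).map PySem.Str.strip).filter (· ≠ "")) []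
  simp only [List.foldl_nil] at h
  exact h
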